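-- pv_equiv track=rewrite | github.com/frymash/NUS-CS1010X | Missions/sidequests/sidequest10.1/sidequest10.1-template.py | game_status
-- ===== SOURCE A (Python) =====
-- def flatten(mat):
--     return [num for row in mat for num in row]
--
-- def game_status(mat):
--     def are_adj_tiles_present():
--         for row in mat:
--             for i in range(len(row)-1):
--                 if row[i] == row[i+1]:
--                     return True
--         return False
--
--     elts = flatten(mat)
--     if 2048 in elts:
--         return "win"
--     elif (0 in elts) or are_adj_tiles_present():
--         return "not over"
--     else:
--         return "lose"
-- ===== SOURCE B (Python) =====
-- def game_status(mat):
--     won = empty = adjacent = False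
--     for row in mat:
--         prev = None
--         for x in row:
--             if x == 2048:
--                 won = True
--             if x == 0:
--                 empty = True
--             if prev is not None and prev == x:
--                 adjacent = True
--             prev = x
--     if won:
--         return "win"
--     if empty or adjacent:
--         return "not over"
--     return "lose"
-- ===== Notes on version B (the rewrite author's own statement) =====
-- stated objective: alternative
-- what changed: Replaces A's flatten + two membership scans + a separate nested adjacency scan with a single pass over the matrix maintaining won/empty/adjacent flags and a previous-element tracker, deciding once at the end.
import Mathlib
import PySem

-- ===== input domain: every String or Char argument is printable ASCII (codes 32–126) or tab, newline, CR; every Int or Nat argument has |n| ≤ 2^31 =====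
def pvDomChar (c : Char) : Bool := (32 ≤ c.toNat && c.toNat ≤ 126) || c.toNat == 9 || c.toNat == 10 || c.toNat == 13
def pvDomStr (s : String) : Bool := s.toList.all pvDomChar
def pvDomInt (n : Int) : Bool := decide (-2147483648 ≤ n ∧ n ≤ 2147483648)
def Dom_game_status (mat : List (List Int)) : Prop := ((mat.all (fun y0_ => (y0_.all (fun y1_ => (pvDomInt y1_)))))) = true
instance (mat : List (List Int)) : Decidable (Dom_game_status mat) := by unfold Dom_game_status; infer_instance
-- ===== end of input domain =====

-- B is a single pass over the cells maintaining won/empty/adjacent flags instead of A's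
-- flatten + two membership scans + a separate nested adjacency scan; same return value.

-- ===== PORT A =====
-- [num for row in mat for num in row]
def pvFlatten (mat : List (List Int)) : List Int := mat.flatMap (fun row => row)

-- inner loop of are_adj_tiles_present for one row: for i in range(len(row)-1): …
def pvAdjRow (row : List Int) : Bool :=
  (List.range (row.length - 1)).any (fun i => row.getD i 0 == row.getD (i + 1) 0)

def game_status (mat : List (List Int)) : String :=
  let elts := pvFlatten mat
  if elts.contains 2048 then "win"
  else if elts.contains 0 || mat.any pvAdjRow then "not over"
  else "lose"

-- ===== PORT B =====
-- inner loop of B over one row: state = (won, empty, adjacent), prev = previous element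
def pvScanRow : List Int → Option Int → (Bool × Bool × Bool) → (Bool × Bool × Bool)
  | [], _, st => st
  | x :: xs, prev, (won, empty, adj) =>
      pvScanRow xs (some x)
        (won || x == 2048, empty || x == 0, adj || prev.elim false (fun p => p == x))

def game_status_alt (mat : List (List Int)) : String :=
  let st := mat.foldl (fun st row => pvScanRow row none st) (false, false, false)
  if st.1 then "win"
  else if st.2.1 || st.2.2 then "not over"
  else "lose"

-- ===== PRECONDITION & SPEC =====
def Spec_game_status (mat : List (List Int)) (out : String) : Prop := out = game_status_alt mat
instance (mat : List (List Int)) (out : String) : Decidable (Spec_game_status mat out) := by unfold Spec_game_status; infer_instance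

-- ===== CLAIM (what is proved, stated in full; the proofs are below) =====
def Claim_equal_game_status : Prop := ∀ (mat : List (List Int)), Dom_game_status mat → Spec_game_status mat (game_status mat)

-- ===== LEMMAS AND PROOFS =====

-- chained-adjacency of B's prev-tracking, in closed form
def pvChain : Option Int → List Int → Bool
  | _, [] => false
  | prev, x :: xs => prev.elim false (fun p => p == x) || pvChain (some x) xs

lemma pvScanRow_eq (row : List Int) : ∀ (prev : Option Int) (w e a : Bool),
    pvScanRow row prev (w, e, a) =
      (w || row.any (· == 2048), e || row.any (· == 0), a || pvChain prev row) := by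
  induction row with
  | nil => intro prev w e a; simp [pvScanRow, pvChain]
  | cons x xs ih =>
      intro prev w e a
      simp [pvScanRow, pvChain, ih, Bool.or_assoc]

lemma pvFoldl_eq (mat : List (List Int)) : ∀ (w e a : Bool),
    mat.foldl (fun st row => pvScanRow row none st) (w, e, a) =
      (w || mat.any (fun r => r.any (· == 2048)),
       e || mat.any (fun r => r.any (· == 0)),
       a || mat.any (fun r => pvChain none r)) := by
  induction mat with
  | nil => intro w e a; simp
  | cons r rs ih =>
      intro w e a
      simp only [List.foldl_cons, pvScanRow_eq, ih, List.any_cons, Bool.or_assoc]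

lemma pvChain_eq_adjRow (row : List Int) : pvChain none row = pvAdjRow row := by
  induction row with
  | nil => simp [pvChain, pvAdjRow]
  | cons x xs ih =>
      cases xs with
      | nil => simp [pvChain, pvAdjRow]
      | cons y ys =>
          have h1 : pvChain none (x :: y :: ys) = ((x == y) || pvChain none (y :: ys)) := by
            simp [pvChain]
          rw [h1, ih]
          simp [pvAdjRow, List.range_succ_eq_map, List.any_map, Function.comp_def]

lemma pvContains_flatten (mat : List (List Int)) (v : Int) :
    (pvFlatten mat).contains v = mat.any (fun r => r.any (· == v)) := by
  rw [Bool.eq_iff_iff]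
  simp [pvFlatten]

-- ===== VERDICT (by name: the statement is the Claim_ definition above) =====
theorem game_status_spec : Claim_equal_game_status := by
  intro mat _
  unfold Spec_game_status game_status game_status_alt
  simp only [pvFoldl_eq, Bool.false_or, pvContains_flatten]
  have hadj : mat.any (fun r => pvChain none r) = mat.any pvAdjRow := by
    simp [pvChain_eq_adjRow]
  rw [hadj]
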